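-- pv_equiv track=rewrite | github.com/Taepoung/Jump2Paper | hooks/scripts/check_output.py | _has_unclosed_template
-- ===== SOURCE A (Python) =====
-- def _has_unclosed_template(code: str) -> bool:
--     """백틱 쌍이 맞는지 확인 (중첩/이스케이프 미지원, 단순 홀수 카운트)."""
--     count = 0
--     i = 0
--     while i < len(code):
--         if code[i] == "\\" and i + 1 < len(code):
--             i += 2
--             continue
--         if code[i] == "`":
--             count += 1
--         i += 1
--     return count % 2 != 0
-- ===== SOURCE B (Python) =====
-- def _has_unclosed_template(code: str) -> bool:
--     """Backtick-parity check: a backtick is real iff the backslash run before it has even length."""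
--     count = 0
--     run = 0
--     for c in code:
--         if c == "\\":
--             run += 1
--         elif c == "`" and run % 2 == 0:
--             count += 1
--             run = 0
--         else:
--             run = 0
--     return count % 2 != 0
-- ===== Notes on version B (the rewrite author's own statement) =====
-- stated objective: faster
-- what changed: A walks an index, consuming backslash escape pairs by skipping two positions at a time; B makes a direct for-each pass that never skips, tracking the parity of the current backslash run and counting a backtick only when the run before it has even length.
import Mathlib
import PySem

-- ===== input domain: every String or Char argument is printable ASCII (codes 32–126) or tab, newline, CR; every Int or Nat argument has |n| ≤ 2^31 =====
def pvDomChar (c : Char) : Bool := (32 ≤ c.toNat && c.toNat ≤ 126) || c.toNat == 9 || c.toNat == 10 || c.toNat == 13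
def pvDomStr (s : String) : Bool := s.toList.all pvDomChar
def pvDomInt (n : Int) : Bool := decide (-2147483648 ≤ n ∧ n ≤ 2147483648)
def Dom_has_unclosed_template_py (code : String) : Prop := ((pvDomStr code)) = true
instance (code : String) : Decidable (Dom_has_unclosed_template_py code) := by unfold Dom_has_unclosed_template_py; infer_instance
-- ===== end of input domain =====

-- B replaces A's index loop that consumes escape pairs by skipping two positions with a
-- direct for-each pass tracking the parity of the current backslash run (objective: faster).

-- ===== PORT A =====
-- A's while-loop: index i over code, skip 2 on a backslash with a successor, count backticks.
def hasUnclosedALoop (code : List Char) (count i : Nat) : Nat :=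
  if h : i < code.length then
    if code[i] = '\\' ∧ i + 1 < code.length then
      hasUnclosedALoop code count (i + 2)
    else if code[i] = '`' then
      hasUnclosedALoop code (count + 1) (i + 1)
    else
      hasUnclosedALoop code count (i + 1)
  else count
termination_by code.length - i
decreasing_by all_goals omega

def has_unclosed_template_py (code : String) : Bool :=
  decide (hasUnclosedALoop code.toList 0 0 % 2 ≠ 0)

-- ===== PORT B =====
-- B's for-each body: state (count, run); a backtick counts iff the backslash run before it is even.
def hasUnclosedBStep (st : Nat × Nat) (c : Char) : Nat × Nat :=
  if c = '\\' then (st.1, st.2 + 1)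
  else if c = '`' ∧ st.2 % 2 = 0 then (st.1 + 1, 0)
  else (st.1, 0)

def has_unclosed_template_py_alt (code : String) : Bool :=
  decide ((code.toList.foldl hasUnclosedBStep (0, 0)).1 % 2 ≠ 0)

-- ===== PRECONDITION & SPEC =====
def Spec_has_unclosed_template_py (code : String) (out : Bool) : Prop := out = has_unclosed_template_py_alt code
instance (code : String) (out : Bool) : Decidable (Spec_has_unclosed_template_py code out) := by unfold Spec_has_unclosed_template_py; infer_instance

-- ===== CLAIM (what is proved, stated in full; the proofs are below) =====
def Claim_equal_has_unclosed_template_py : Prop := ∀ (code : String), Dom_has_unclosed_template_py code → Spec_has_unclosed_template_py code (has_unclosed_template_py code)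

-- ===== LEMMAS AND PROOFS =====

-- Common specification: number of unescaped backticks in the suffix, given the parity p of the
-- open backslash run immediately before it (p = true: the next character is escaped).
def unescapedTicks (p : Bool) : List Char → Nat
  | [] => 0
  | c :: r =>
    if c = '\\' then unescapedTicks (!p) r
    else if c = '`' then (if p then 0 else 1) + unescapedTicks false r
    else unescapedTicks false r

theorem bFold_eq (cs : List Char) : ∀ (count run : Nat),
    (cs.foldl hasUnclosedBStep (count, run)).1 = count + unescapedTicks (decide (run % 2 = 1)) cs := by
  induction cs with
  | nil => intro count run; simp [unescapedTicks]
  | cons c r ih =>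
    intro count run
    by_cases hb : c = '\\'
    · have hpar : decide ((run + 1) % 2 = 1) = !decide (run % 2 = 1) := by
        rcases Nat.mod_two_eq_zero_or_one run with h | h <;> simp [Nat.add_mod, h]
      simp [List.foldl_cons, hasUnclosedBStep, hb, ih, unescapedTicks, hpar]
    · by_cases ht : c = '`'
      · rcases Nat.mod_two_eq_zero_or_one run with h | h <;>
        simp [List.foldl_cons, hasUnclosedBStep, ht, h, ih, unescapedTicks] <;> omega
      · simp [List.foldl_cons, hasUnclosedBStep, hb, ht, ih, unescapedTicks]

theorem aLoop_eq (code : List Char) (count i : Nat) :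
    hasUnclosedALoop code count i = count + unescapedTicks false (code.drop i) := by
  induction count, i using hasUnclosedALoop.induct (code := code) with
  | case1 count i h hc ih =>
    -- code[i] = '\\' and i+1 < len : skip two characters
    rw [hasUnclosedALoop, dif_pos h, if_pos hc, ih]
    rw [List.drop_eq_getElem_cons h, List.drop_eq_getElem_cons hc.2]
    simp [unescapedTicks, hc.1]
  | case2 count i h hc ht ih =>
    -- code[i] = '`'
    rw [hasUnclosedALoop, dif_pos h, if_neg hc, if_pos ht, ih]
    rw [List.drop_eq_getElem_cons h]
    simp [unescapedTicks, ht]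
    omega
  | case3 count i h hc ht ih =>
    -- other character (or a trailing backslash with nothing after it)
    rw [hasUnclosedALoop, dif_pos h, if_neg hc, if_neg ht, ih]
    rw [List.drop_eq_getElem_cons h]
    by_cases hb : code[i] = '\\'
    · -- trailing backslash: i+1 = length, so the remaining suffix is empty
      have hnil : code.drop (i+1) = [] := List.drop_eq_nil_of_le (by
        rcases Nat.lt_or_ge (i+1) code.length with hlt | hge
        · exact absurd ⟨hb, hlt⟩ hc
        · exact hge)
      simp [unescapedTicks, hb, hnil]
    · simp [unescapedTicks, hb, ht]
  | case4 count i h =>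
    rw [hasUnclosedALoop, dif_neg h]
    have hnil : code.drop i = [] := List.drop_eq_nil_of_le (by omega)
    simp [hnil, unescapedTicks]

theorem counts_agree (code : String) :
    hasUnclosedALoop code.toList 0 0 = (code.toList.foldl hasUnclosedBStep (0, 0)).1 := by
  rw [aLoop_eq, bFold_eq]
  simp

-- ===== VERDICT (by name: the statement is the Claim_ definition above) =====
theorem has_unclosed_template_py_spec : Claim_equal_has_unclosed_template_py := by
  intro code _
  unfold Spec_has_unclosed_template_py has_unclosed_template_py has_unclosed_template_py_alt
  rw [counts_agree]
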